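-- pv_equiv track=rewrite | github.com/sbrodehl/remotesensing-14-03760 | src/data/dataset/AbstractBINARYDataset.py | generate_continuous_patches
-- ===== SOURCE A (Python) =====
-- def generate_continuous_patches(samples, time_delta=None):
--     if time_delta is None:
--         return [samples]
--     # iterate over samples and check if "time delta" holds
--     ret = []
--     _lst = []
--     _prev = None
--     for s in samples:
--         if _prev is None:
--             _prev = s
--             _lst.append(s)
--             continue
--         if _prev + time_delta == s:
--             _prev = s
--             _lst.append(s)
--         else:
--             ret.append(_lst.copy())
--             _lst.clear()
--             _prev = s
--             _lst.append(s)
--     # check remaining list items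
--     if len(_lst) > 0:
--         ret.append(_lst.copy())
--         del _lst
--     return ret
-- ===== SOURCE B (Python) =====
-- def generate_continuous_patches(samples, time_delta=None):
--     if time_delta is None:
--         return [samples]
--     lst = list(samples)
--     if not lst:
--         return []
--     # phase 1: boundary indices where a run ends (lst[i] does not continue lst[i-1])
--     bounds = [0]
--     for i in range(1, len(lst)):
--         if lst[i] != lst[i - 1] + time_delta:
--             bounds.append(i)
--     bounds.append(len(lst))
--     # phase 2: slice between consecutive boundaries
--     return [lst[a:b] for a, b in zip(bounds, bounds[1:])]
-- ===== Notes on version B (the rewrite author's own statement) =====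
-- stated objective: alternative
-- what changed: B replaces A's single-pass accumulate-and-flush loop (current run + prev element, flushed at each break and after the loop) by a two-phase strategy: first compute the list of boundary indices where lst[i] != lst[i-1] + time_delta, then slice the list between consecutive boundaries.
import Mathlib
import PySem

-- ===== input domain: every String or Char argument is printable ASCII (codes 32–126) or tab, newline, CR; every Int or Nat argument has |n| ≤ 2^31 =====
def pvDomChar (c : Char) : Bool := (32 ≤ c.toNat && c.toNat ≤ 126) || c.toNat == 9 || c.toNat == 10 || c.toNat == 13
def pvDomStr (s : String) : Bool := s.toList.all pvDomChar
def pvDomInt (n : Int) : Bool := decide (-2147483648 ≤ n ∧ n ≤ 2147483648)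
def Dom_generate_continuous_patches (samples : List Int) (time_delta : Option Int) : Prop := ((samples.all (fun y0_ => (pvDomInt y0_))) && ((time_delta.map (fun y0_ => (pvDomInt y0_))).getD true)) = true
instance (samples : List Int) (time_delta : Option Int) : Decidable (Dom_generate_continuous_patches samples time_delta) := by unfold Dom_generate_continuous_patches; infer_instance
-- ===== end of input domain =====

-- B replaces A's incremental accumulate-and-flush loop by a two-phase strategy:
-- first compute the boundary indices where a run breaks, then slice the list
-- between consecutive boundaries (objective: alternative, same O(n) cost).

-- ===== PORT A =====
-- state = (ret, _lst, _prev); the loop body follows A branch for branch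
def gcpAStep (d : Int) (st : List (List Int) × List Int × Option Int) (s : Int) :
    List (List Int) × List Int × Option Int :=
  match st with
  | (ret, lst, none) => (ret, lst ++ [s], some s)
  | (ret, lst, some p) =>
    if p + d = s then (ret, lst ++ [s], some s)
    else (ret ++ [lst], [s], some s)

def generate_continuous_patches (samples : List Int) (time_delta : Option Int) : List (List Int) :=
  match time_delta with
  | none => [samples]
  | some d =>
    let st := samples.foldl (gcpAStep d) ([], [], none)
    if st.2.1.length > 0 then st.1 ++ [st.2.1] else st.1

-- ===== PORT B =====
-- phase 1: `bounds`-loop body — for i in range(1, len(lst)), append i when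
-- lst[i] != lst[i-1] + d (indices are always in range, so pyGetD is exact here)
def gcpBreaks (d : Int) (lst : List Int) : List Int :=
  (PySem.List.pyRange 1 lst.length 1).foldl
    (fun acc i =>
      if PySem.List.pyGetD lst i 0 ≠ PySem.List.pyGetD lst (i - 1) 0 + d then acc ++ [i] else acc)
    []

-- phase 2: `[lst[a:b] for a, b in zip(bounds, bounds[1:])]`
def generate_continuous_patches_alt (samples : List Int) (time_delta : Option Int) : List (List Int) :=
  match time_delta with
  | none => [samples]
  | some d =>
    match samples with
    | [] => []
    | _ :: _ =>
      let bounds : List Int := [0] ++ gcpBreaks d samples ++ [(samples.length : Int)]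
      (bounds.zip bounds.tail).map (fun p => PySem.List.slice samples (some p.1) (some p.2))

-- ===== PRECONDITION & SPEC =====
def Spec_generate_continuous_patches (samples : List Int) (time_delta : Option Int) (out : List (List Int)) : Prop := out = generate_continuous_patches_alt samples time_delta
instance (samples : List Int) (time_delta : Option Int) (out : List (List Int)) : Decidable (Spec_generate_continuous_patches samples time_delta out) := by unfold Spec_generate_continuous_patches; infer_instance

-- ===== CLAIM (what is proved, stated in full; the proofs are below) =====
def Claim_equal_generate_continuous_patches : Prop := ∀ (samples : List Int) (time_delta : Option Int), Dom_generate_continuous_patches samples time_delta → Spec_generate_continuous_patches samples time_delta (generate_continuous_patches samples time_delta)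

-- ===== LEMMAS AND PROOFS =====

-- intermediate cons-based form of the runs: both ports are related to it
def gcpCons (d : Int) (s : Int) (out : List (List Int)) : List (List Int) :=
  match out with
  | (x :: xs) :: rest => if s + d = x then (s :: x :: xs) :: rest else [s] :: (x :: xs) :: rest
  | _ => [s] :: out

-- abstract description of A's run-building from a mid-loop state (lst, prev)
def gcpG (d : Int) (lst : List Int) (p : Int) : List Int → List (List Int)
  | [] => [lst]
  | s :: rest => if p + d = s then gcpG d (lst ++ [s]) s rest else lst :: gcpG d [s] s rest

-- A's finished fold from state (ret, lst, some p), lst nonempty, equals ret ++ gcpG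
theorem gcpA_run (d : Int) (t : List Int) : ∀ (ret : List (List Int)) (lst : List Int) (p : Int),
    lst ≠ [] →
    (let st := t.foldl (gcpAStep d) (ret, lst, some p);
     if st.2.1.length > 0 then st.1 ++ [st.2.1] else st.1) = ret ++ gcpG d lst p t := by
  induction t with
  | nil =>
    intro ret lst p h
    simp [gcpG, List.length_pos_iff, h]
  | cons s rest ih =>
    intro ret lst p h
    simp only [List.foldl_cons, gcpAStep, gcpG]
    by_cases hc : p + d = s
    · simpa [hc] using ih ret (lst ++ [s]) s (by simp)
    · simpa [hc, List.append_assoc] using ih (ret ++ [lst]) [s] s (by simp)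

-- the cons-based foldr on a nonempty list yields a nonempty first run starting
-- with the head, and gcpG from any state relates to it as stated
theorem gcpG_brec (d : Int) : ∀ (rest : List Int) (s : Int),
    ∃ f o, (s :: rest).foldr (gcpCons d) [] = (s :: f) :: o ∧
      ∀ (lst : List Int) (p : Int),
        gcpG d lst p (s :: rest) = if p + d = s then (lst ++ s :: f) :: o else lst :: (s :: f) :: o := by
  intro rest
  induction rest with
  | nil =>
    intro s
    refine ⟨[], [], rfl, ?_⟩
    intro lst p
    by_cases hc : p + d = s <;> simp [gcpG, hc]
  | cons s2 r ih =>
    intro s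
    obtain ⟨f, o, hfold, hG⟩ := ih s2
    by_cases hc : s + d = s2
    · refine ⟨s2 :: f, o, ?_, ?_⟩
      · simp [List.foldr_cons, hfold, gcpCons, hc]
      · intro lst p
        have h1 : gcpG d lst p (s :: s2 :: r) =
            if p + d = s then gcpG d (lst ++ [s]) s (s2 :: r) else lst :: gcpG d [s] s (s2 :: r) := rfl
        rw [h1, hG, hG]
        by_cases hp : p + d = s <;> simp [hp, hc]
    · refine ⟨[], (s2 :: f) :: o, ?_, ?_⟩
      · simp [List.foldr_cons, hfold, gcpCons, hc]
      · intro lst p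
        have h1 : gcpG d lst p (s :: s2 :: r) =
            if p + d = s then gcpG d (lst ++ [s]) s (s2 :: r) else lst :: gcpG d [s] s (s2 :: r) := rfl
        rw [h1, hG, hG]
        by_cases hp : p + d = s <;> simp [hp, hc]

-- A equals the cons-based form
theorem gcpA_eq_cons (d : Int) (samples : List Int) :
    generate_continuous_patches samples (some d) = samples.foldr (gcpCons d) [] := by
  unfold generate_continuous_patches
  match samples with
  | [] => rfl
  | h :: t =>
    simp only
    have hstep : (h :: t).foldl (gcpAStep d) ([], [], none) = t.foldl (gcpAStep d) ([], [h], some h) := by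
      simp [gcpAStep]
    rw [hstep]
    have hA := gcpA_run d t [] [h] h (by simp)
    simp only at hA
    rw [hA]
    match t with
    | [] => simp [gcpG, gcpCons]
    | s :: r =>
      obtain ⟨f, o, hfold, hG⟩ := gcpG_brec d r s
      rw [hG [h] h]
      by_cases hc : h + d = s
      · simp [List.foldr_cons, hfold, gcpCons, hc]
      · simp [List.foldr_cons, hfold, gcpCons, hc]

-- Nat-level mirror of B's phase 1: indices k with lst[k+1] ≠ lst[k] + d
def gcpNbrk (d : Int) (lst : List Int) : List Nat :=
  (List.range (lst.length - 1)).filter (fun k => decide (lst.getD (k + 1) 0 ≠ lst.getD k 0 + d))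

-- Nat-level mirror of B's phase 2
def gcpSliceCore (lst : List Int) (bnds : List Nat) : List (List Int) :=
  (bnds.zip bnds.tail).map (fun p => (lst.drop p.1).take (p.2 - p.1))

-- B's Int-indexed breaks are the Nat-level ones shifted by one and cast
theorem gcpBreaks_eq_nbrk (d : Int) (lst : List Int) :
    gcpBreaks d lst = (gcpNbrk d lst).map (fun k => ((k + 1 : Nat) : Int)) := by
  unfold gcpBreaks gcpNbrk
  have hfun : (fun (acc : List Int) (i : Int) =>
      if PySem.List.pyGetD lst i 0 ≠ PySem.List.pyGetD lst (i - 1) 0 + d then acc ++ [i] else acc) =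
      (fun acc i =>
        if (fun i => decide (PySem.List.pyGetD lst i 0 ≠ PySem.List.pyGetD lst (i - 1) 0 + d)) i = true
        then acc ++ [id i] else acc) := by
    funext acc i
    simp
  rw [hfun, PySem.List.foldl_append_if, PySem.List.pyRange_one, List.filter_map]
  simp only [List.nil_append, List.map_map]
  have hlen : ((lst.length : Int) - 1).toNat = lst.length - 1 := by omega
  rw [hlen]
  rw [List.filter_congr (l := List.range (lst.length - 1))
    (q := fun k => decide (lst.getD (k + 1) 0 ≠ lst.getD k 0 + d)) ?_]
  · apply List.map_congr_left
    intro k _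
    simp
    omega
  · intro k _
    simp only [Function.comp,
      show (1 : Int) + (k : Int) = ((k + 1 : Nat) : Int) from by push_cast; ring,
      show ((k + 1 : Nat) : Int) - 1 = ((k : Nat) : Int) from by push_cast; ring,
      PySem.List.pyGetD_natCast]

-- B's body on a nonempty list is the Nat-level two-phase core
theorem gcpB_eq_core (d : Int) (x : Int) (xs : List Int) :
    generate_continuous_patches_alt (x :: xs) (some d) =
      gcpSliceCore (x :: xs) (0 :: ((gcpNbrk d (x :: xs)).map (· + 1) ++ [(x :: xs).length])) := by
  unfold generate_continuous_patches_alt gcpSliceCore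
  simp only
  rw [gcpBreaks_eq_nbrk]
  have hcast : ([(0 : Int)] ++ (gcpNbrk d (x :: xs)).map (fun k => ((k + 1 : Nat) : Int)) ++ [((x :: xs).length : Int)]) =
      ((0 :: ((gcpNbrk d (x :: xs)).map (· + 1) ++ [(x :: xs).length])).map (fun n : Nat => (n : Int))) := by
    simp [List.map_map, Function.comp]
  rw [hcast]
  have htail : ∀ (L : List Nat), ((L.map (fun n : Nat => (n : Int))).tail) = (L.tail.map (fun n : Nat => (n : Int))) := by
    intro L; cases L <;> simp
  rw [htail, List.zip_map, List.map_map]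
  apply List.map_congr_left
  intro p _
  simp only [Function.comp, Prod.map]
  rw [PySem.List.slice_natCast]

-- prepending x extends the FIRST slice when all inner bounds shift by one
theorem gcpSliceCore_shift (x : Int) (xs : List Int) (t0 : Nat) (ts : List Nat) :
    gcpSliceCore (x :: xs) (0 :: (t0 + 1) :: ts.map (· + 1)) =
      (x :: xs.take t0) :: ((t0 :: ts).zip ts).map (fun p => (xs.drop p.1).take (p.2 - p.1)) := by
  unfold gcpSliceCore
  simp only [List.tail_cons, List.zip_cons_cons, List.map_cons]
  congr 1
  rw [show (((t0 + 1) :: List.map (· + 1) ts : List Nat)) = List.map (· + 1) (t0 :: ts) from rfl,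
    List.zip_map, List.map_map]
  apply List.map_congr_left
  intro p _
  simp [Prod.map, Nat.succ_sub_succ]

-- breaking: bound 1 cuts off [x], the rest shifts by one
theorem gcpSliceCore_break (x : Int) (xs : List Int) (t0 : Nat) (ts : List Nat) :
    gcpSliceCore (x :: xs) (0 :: 1 :: (t0 + 1) :: ts.map (· + 1)) =
      [x] :: gcpSliceCore xs (0 :: t0 :: ts) := by
  unfold gcpSliceCore
  simp only [List.tail_cons, List.zip_cons_cons, List.map_cons]
  congr 1
  congr 1
  rw [show (((t0 + 1) :: List.map (· + 1) ts : List Nat)) = List.map (· + 1) (t0 :: ts) from rfl,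
    List.zip_map, List.map_map]
  apply List.map_congr_left
  intro p _
  simp [Prod.map, Nat.succ_sub_succ]

-- the Nat-level breaks of x :: y :: ys: a break at 0 iff y ≠ x + d, the rest shifted
theorem gcpNbrk_cons (d : Int) (x y : Int) (ys : List Int) :
    gcpNbrk d (x :: y :: ys) =
      (if y ≠ x + d then [0] else []) ++ (gcpNbrk d (y :: ys)).map (· + 1) := by
  unfold gcpNbrk
  have hlen : (x :: y :: ys).length - 1 = ((y :: ys).length - 1) + 1 := by simp
  rw [hlen, List.range_succ_eq_map, List.filter_cons, List.filter_map]
  have hrest : List.filter ((fun k => decide ((x :: y :: ys).getD (k + 1) 0 ≠ (x :: y :: ys).getD k 0 + d)) ∘ Nat.succ) (List.range ((y :: ys).length - 1)) =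
      List.filter (fun k => decide ((y :: ys).getD (k + 1) 0 ≠ (y :: ys).getD k 0 + d)) (List.range ((y :: ys).length - 1)) := by
    apply List.filter_congr
    intro k _
    simp [Function.comp, Nat.succ_eq_add_one]
  rw [hrest]
  have hmapeq : List.map Nat.succ (List.filter (fun k => decide ((y :: ys).getD (k + 1) 0 ≠ (y :: ys).getD k 0 + d)) (List.range ((y :: ys).length - 1))) =
      (gcpNbrk d (y :: ys)).map (· + 1) := by
    unfold gcpNbrk
    apply List.map_congr_left
    intro k _
    simp [Nat.succ_eq_add_one]
  by_cases hc : y = x + d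
  · rw [if_neg (by simp [hc]), if_neg (by simp [hc])]
    simpa using hmapeq
  · rw [if_pos (by simp [hc]), if_pos (by simp [hc])]
    simpa using hmapeq

-- the head of the bounds tail of a nonempty list is positive
theorem gcpBound_head_pos (d : Int) (y : Int) (ys : List Int) (t0 : Nat) (ts : List Nat)
    (hm : (gcpNbrk d (y :: ys)).map (· + 1) ++ [(y :: ys).length] = t0 :: ts) : 1 ≤ t0 := by
  have hmem : t0 ∈ (gcpNbrk d (y :: ys)).map (· + 1) ++ [(y :: ys).length] := by
    rw [hm]; exact List.mem_cons_self
  rcases List.mem_append.mp hmem with h | h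
  · obtain ⟨k, -, rfl⟩ := List.mem_map.mp h
    omega
  · simp at h
    simp [h]

-- the two-phase core satisfies gcpCons's recursion
theorem gcpB_cons (d : Int) (x : Int) (xs : List Int) :
    generate_continuous_patches_alt (x :: xs) (some d) =
      gcpCons d x (generate_continuous_patches_alt xs (some d)) := by
  match xs with
  | [] =>
    simp [generate_continuous_patches_alt, gcpBreaks, gcpCons,
      PySem.List.pyRange_one_eq_nil, PySem.List.slice_to]
  | y :: ys =>
    rw [gcpB_eq_core d x (y :: ys), gcpB_eq_core d y ys]
    rw [gcpNbrk_cons]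
    have hmap : ((if y ≠ x + d then [0] else []) ++ (gcpNbrk d (y :: ys)).map (· + 1)).map (· + 1) ++ [(x :: y :: ys).length] =
        ((if y ≠ x + d then [1] else []) ++ ((gcpNbrk d (y :: ys)).map (· + 1) ++ [(y :: ys).length]).map (· + 1)) := by
      by_cases hc : y = x + d <;> simp [hc, List.map_map]
    rw [hmap]
    match hm : (gcpNbrk d (y :: ys)).map (· + 1) ++ [(y :: ys).length] with
    | [] => exact absurd hm (by simp)
    | t0 :: ts =>
      have ht0 := gcpBound_head_pos d y ys t0 ts hm
      obtain ⟨t0', rfl⟩ : ∃ t0', t0 = t0' + 1 := ⟨t0 - 1, by omega⟩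
      by_cases hc : y = x + d
      · rw [if_neg (by simp [hc])]
        simp only [List.nil_append, List.map_cons]
        rw [gcpSliceCore_shift x (y :: ys) (t0' + 1) ts]
        simp only [gcpSliceCore, List.tail_cons, List.zip_cons_cons, List.map_cons,
          Nat.sub_zero, List.drop_zero, List.take_succ_cons, gcpCons]
        rw [if_pos hc.symm]
      · rw [if_pos (by simp [hc])]
        simp only [List.cons_append, List.nil_append, List.map_cons]
        rw [gcpSliceCore_break x (y :: ys) (t0' + 1) ts]
        simp only [gcpSliceCore, List.tail_cons, List.zip_cons_cons, List.map_cons,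
          Nat.sub_zero, List.drop_zero, List.take_succ_cons, gcpCons]
        rw [if_neg (fun h => hc h.symm)]

-- B equals the cons-based form
theorem gcpB_eq_cons (d : Int) (samples : List Int) :
    generate_continuous_patches_alt samples (some d) = samples.foldr (gcpCons d) [] := by
  induction samples with
  | nil => rfl
  | cons x xs ih => rw [gcpB_cons, ih, List.foldr_cons]

-- ===== VERDICT (by name: the statement is the Claim_ definition above) =====
theorem generate_continuous_patches_spec : Claim_equal_generate_continuous_patches := by
  intro samples time_delta _
  unfold Spec_generate_continuous_patches
  match time_delta with
  | none => rfl
  | some d => rw [gcpA_eq_cons, gcpB_eq_cons]
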